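-- pv_equiv track=rewrite | github.com/teo3300/bmp2c | writer.py | joint
-- ===== SOURCE A (Python) =====
-- def joint(index_map, ii, bpp):
--     '''combine 4 or 8 index_map values together depending on bpp'''
--     # This allows to create a 32bit array, instead of 16bit array,
--     # which is slower to compute or 8bit array which can't be copied
--     # on VRAM due to GBA limitations
--     if bpp == 8:
--         ratio = 1   # 4
--     elif bpp == 4:
--         ratio = 2   # 8
--     value = 0
--     for i in range(2<<ratio):
--         value = value + (index_map[ii+i]<<(i*bpp))
--     return value
-- ===== SOURCE B (Python) =====
-- def joint(index_map, ii, bpp):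
--     '''combine 4 or 8 index_map values together depending on bpp'''
--     if bpp == 8:
--         ratio = 1
--     elif bpp == 4:
--         ratio = 2
--     count = 2 << ratio
--
--     def pack(k):
--         if k == count:
--             return 0
--         return index_map[ii + k] + (pack(k + 1) << bpp)
--
--     return pack(0)
-- ===== Notes on version B (the rewrite author's own statement) =====
-- stated objective: alternative
-- what changed: B packs the indices by structural recursion (pack(k) = index_map[ii+k] + (pack(k+1) << bpp), a Horner scheme from the least significant index) instead of A's iterative loop summing independently shifted terms with an i*bpp shift amount.
import Mathlib
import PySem

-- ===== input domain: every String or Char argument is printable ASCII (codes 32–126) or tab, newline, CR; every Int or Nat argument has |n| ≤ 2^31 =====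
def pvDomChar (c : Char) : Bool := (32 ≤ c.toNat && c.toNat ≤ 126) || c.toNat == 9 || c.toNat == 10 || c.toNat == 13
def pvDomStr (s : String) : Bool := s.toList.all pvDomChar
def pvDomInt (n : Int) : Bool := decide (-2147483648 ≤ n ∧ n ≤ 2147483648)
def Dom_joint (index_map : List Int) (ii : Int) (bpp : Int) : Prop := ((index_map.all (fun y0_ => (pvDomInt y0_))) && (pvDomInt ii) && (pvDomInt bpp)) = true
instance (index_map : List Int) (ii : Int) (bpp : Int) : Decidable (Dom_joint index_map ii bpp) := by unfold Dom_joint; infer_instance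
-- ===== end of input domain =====

-- B packs by structural recursion, a Horner scheme from the least significant index
-- (pack k = index_map[ii+k] + (pack (k+1) << bpp)), instead of A's iterative loop summing
-- independently shifted terms; same cost, different decomposition.

-- ===== PORT A =====
def joint (index_map : List Int) (ii : Int) (bpp : Int) : Int :=
  -- ratio defaults to 0 where Python raises NameError (bpp ∉ {4,8}); Pre_joint excludes that
  let ratio : Int := if bpp = 8 then 1 else if bpp = 4 then 2 else 0
  (PySem.List.pyRange 0 ((2:Int) <<< ratio.toNat) 1).foldl
    (fun value i => value + (PySem.List.pyGetD index_map (ii + i) 0 <<< (i * bpp).toNat)) 0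

-- ===== PORT B =====
-- recursive helper 'pack' of Source B; the fuel n counts the remaining calls (count - k)
def jointPack (index_map : List Int) (ii : Int) (bpp : Int) (k : Int) : Nat → Int
  | 0 => 0
  | n + 1 =>
      PySem.List.pyGetD index_map (ii + k) 0 +
        (jointPack index_map ii bpp (k + 1) n <<< bpp.toNat)

def joint_alt (index_map : List Int) (ii : Int) (bpp : Int) : Int :=
  let ratio : Int := if bpp = 8 then 1 else if bpp = 4 then 2 else 0
  let count : Int := (2:Int) <<< ratio.toNat
  jointPack index_map ii bpp 0 count.toNat

-- ===== PRECONDITION & SPEC =====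
-- Pre_joint: bpp ∈ {4,8} (otherwise A raises NameError on the unbound 'ratio') and every accessed
-- index ii+i, i < count, is a valid Python index (otherwise IndexError).
def Pre_joint (index_map : List Int) (ii : Int) (bpp : Int) : Prop :=
  (bpp = 8 ∨ bpp = 4) ∧
  -(index_map.length : Int) ≤ ii ∧
  ii + (if bpp = 8 then 4 else 8) ≤ (index_map.length : Int)
instance (index_map : List Int) (ii : Int) (bpp : Int) : Decidable (Pre_joint index_map ii bpp) := by
  unfold Pre_joint; infer_instance

def pvWitness_joint : List Int × Int × Int := ([1, 2, 3, 4], 0, 8)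

def Spec_joint (index_map : List Int) (ii : Int) (bpp : Int) (out : Int) : Prop := out = joint_alt index_map ii bpp
instance (index_map : List Int) (ii : Int) (bpp : Int) (out : Int) : Decidable (Spec_joint index_map ii bpp out) := by unfold Spec_joint; infer_instance

-- ===== CLAIM (what is proved, stated in full; the proofs are below) =====
def Claim_equal_joint : Prop := ∀ (index_map : List Int) (ii : Int) (bpp : Int), Dom_joint index_map ii bpp → Pre_joint index_map ii bpp → Spec_joint index_map ii bpp (joint index_map ii bpp)

-- ===== LEMMAS AND PROOFS =====

-- ===== VERDICT (by name: the statement is the Claim_ definition above) =====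
theorem joint_spec : Claim_equal_joint := by
  intro index_map ii bpp _ hpre
  obtain ⟨hb, _, _⟩ := hpre
  unfold Spec_joint joint joint_alt
  rcases hb with h8 | h4
  · subst h8
    simp [PySem.List.pyRange, List.range_succ, jointPack, Int.shiftLeft_eq]
    ring
  · subst h4
    simp [PySem.List.pyRange, List.range_succ, jointPack, Int.shiftLeft_eq]
    ring
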